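-- pv_equiv track=rewrite | github.com/riccardoscilla/mining-tweets | tests/eg.py | genCondTransactions
-- ===== SOURCE A (Python) =====
-- def genCondTransactions(basket, rank, nPartitions):
--     #translate into new id's using rank
--     filtered = [rank[x] for x in basket if x in rank]
--     #sort basket in ascending rank
--     filtered = sorted(filtered)
--     #subpatterns to send to each worker. (part_id, basket_slice)
--     output = {}
--     for i in range(len(filtered)-1, -1, -1):
--         item = filtered[i]
--         partition = getPartitionId(item, nPartitions)
--         if partition not in output:
--             output[partition] = filtered[:i+1]
--     return [x for x in output.items()]
--
-- def getPartitionId(key, nPartitions):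
--     return key % nPartitions
-- ===== SOURCE B (Python) =====
-- def genCondTransactions(basket, rank, nPartitions):
--     filtered = sorted(rank[x] for x in basket if x in rank)
--     return _emit(filtered, set(), nPartitions)
--
-- def _emit(prefix, seen, nPartitions):
--     # peel the last element; emit the whole current prefix the first time
--     # (from the right) its partition is encountered
--     if not prefix:
--         return []
--     p = prefix[-1] % nPartitions
--     if p in seen:
--         return _emit(prefix[:-1], seen, nPartitions)
--     return [(p, prefix)] + _emit(prefix[:-1], seen | {p}, nPartitions)
--
-- def getPartitionId(key, nPartitions):
--     return key % nPartitions
-- ===== Notes on version B (the rewrite author's own statement) =====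
-- stated objective: alternative
-- what changed: Eliminates A's dict entirely: B recursively peels the last element off the sorted prefix, emitting (partition, whole current prefix) the first time a partition is met from the right, carrying a seen-set accumulator; no index arithmetic, no dict, no items() pass.
import Mathlib
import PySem

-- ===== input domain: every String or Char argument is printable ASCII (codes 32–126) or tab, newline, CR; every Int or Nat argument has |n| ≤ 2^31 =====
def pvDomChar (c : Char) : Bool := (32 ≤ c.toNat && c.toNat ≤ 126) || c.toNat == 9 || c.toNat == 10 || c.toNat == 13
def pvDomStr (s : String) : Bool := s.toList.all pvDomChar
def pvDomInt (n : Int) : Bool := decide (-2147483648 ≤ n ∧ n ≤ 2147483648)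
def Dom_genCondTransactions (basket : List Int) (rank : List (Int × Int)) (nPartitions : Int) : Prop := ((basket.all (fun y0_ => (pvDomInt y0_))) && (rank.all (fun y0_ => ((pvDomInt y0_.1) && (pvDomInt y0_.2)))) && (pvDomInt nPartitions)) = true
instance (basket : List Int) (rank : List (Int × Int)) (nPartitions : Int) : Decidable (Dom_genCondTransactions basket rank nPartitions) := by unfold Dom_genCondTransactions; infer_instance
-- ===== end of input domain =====

-- B drops A's dict and index loop entirely: it recursively peels the last element off the
-- sorted prefix, emitting the whole current prefix on each first-from-the-right partition,
-- with a seen-set accumulator (objective: alternative).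

-- ===== PORT A =====
def getPartitionId (key : Int) (nPartitions : Int) : Int := PySem.Int.mod key nPartitions

def genCondTransactions (basket : List Int) (rank : List (Int × Int)) (nPartitions : Int) : List (Int × List Int) :=
  let rd := PySem.Dict.ofList rank
  let filtered0 := basket.filterMap (fun x => rd.get? x)
  let filtered := PySem.List.sorted filtered0 (fun x => x) false
  let output := (PySem.List.pyRange ((filtered.length : Int) - 1) (-1) (-1)).foldl
    (fun (d : PySem.Dict Int (List Int)) i =>
      let item := PySem.List.pyGetD filtered i 0
      let partition := getPartitionId item nPartitions
      if !(d.contains partition) then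
        d.insert partition (PySem.List.slice filtered none (some (i + 1)))
      else d) PySem.Dict.empty
  output.items

-- ===== PORT B =====
-- _emit: 'prefix[-1]' is getLast on the guarded nonempty list and 'prefix[:-1]' is
-- dropLast (exact: PySem.List.slice_to_neg_one); 'p in seen' is PySem.Set.contains.
def pvEmit (pre : List Int) (seen : PySem.Set Int) (m : Int) : List (Int × List Int) :=
  if h : pre = [] then []
  else
    let p := PySem.Int.mod (pre.getLast h) m
    if PySem.Set.contains seen p then pvEmit pre.dropLast seen m
    else (p, pre) :: pvEmit pre.dropLast (PySem.Set.add seen p) m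
termination_by pre.length
decreasing_by
  all_goals
    have hpos : 0 < pre.length := List.length_pos_of_ne_nil h
    simp [List.length_dropLast]; omega

def genCondTransactions_alt (basket : List Int) (rank : List (Int × Int)) (nPartitions : Int) : List (Int × List Int) :=
  let rd := PySem.Dict.ofList rank
  let filtered := PySem.List.sorted (basket.filterMap (fun x => rd.get? x)) (fun x => x) false
  pvEmit filtered PySem.Set.empty nPartitions

-- ===== PRECONDITION & SPEC =====
-- Pre_ excludes exactly the inputs where Python's '%' raises ZeroDivisionError:
-- nPartitions = 0 while some basket element has a rank (so the loop body runs).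
def Pre_genCondTransactions (basket : List Int) (rank : List (Int × Int)) (nPartitions : Int) : Prop :=
  nPartitions ≠ 0 ∨ ∀ x ∈ basket, ∀ p ∈ rank, p.1 ≠ x
instance (basket : List Int) (rank : List (Int × Int)) (nPartitions : Int) : Decidable (Pre_genCondTransactions basket rank nPartitions) := by unfold Pre_genCondTransactions; infer_instance

def pvWitness_genCondTransactions : List Int × (List (Int × Int)) × Int :=
  ([3, 1, 2, 1, 5], ([(3, 0), (1, 2), (2, 5), (5, 7)], 3))

def Spec_genCondTransactions (basket : List Int) (rank : List (Int × Int)) (nPartitions : Int) (out : List (Int × List Int)) : Prop := out = genCondTransactions_alt basket rank nPartitions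
instance (basket : List Int) (rank : List (Int × Int)) (nPartitions : Int) (out : List (Int × List Int)) : Decidable (Spec_genCondTransactions basket rank nPartitions out) := by unfold Spec_genCondTransactions; infer_instance

-- ===== CLAIM (what is proved, stated in full; the proofs are below) =====
def Claim_equal_genCondTransactions : Prop := ∀ (basket : List Int) (rank : List (Int × Int)) (nPartitions : Int), Dom_genCondTransactions basket rank nPartitions → Pre_genCondTransactions basket rank nPartitions → Spec_genCondTransactions basket rank nPartitions (genCondTransactions basket rank nPartitions)

-- ===== LEMMAS AND PROOFS =====

-- reference list: (partition, index) pairs discovered scanning l from index k-1 down to 0,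
-- keeping the first (i.e. highest-index) occurrence of each partition
def spec2 (l : List Int) (m : Int) : Nat → List Int → List (Int × Int)
  | 0, _ => []
  | k + 1, seen =>
    let q := PySem.Int.mod (l.getD k 0) m
    if q ∈ seen then spec2 l m k seen
    else (q, (k : Int)) :: spec2 l m k (q :: seen)

def toEntry (l : List Int) (kv : Int × Int) : Int × List Int :=
  (kv.1, PySem.List.slice l none (some (kv.2 + 1)))

lemma pyRange_desc_eq (k : Nat) :
    PySem.List.pyRange ((k : Int) - 1) (-1) (-1) = (List.range k).map (fun j : Nat => (k : Int) - 1 - (j : Int)) := by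
  unfold PySem.List.pyRange
  rw [if_neg (by decide : ¬ (-1 : Int) = 0), if_neg (by decide : ¬ (0:Int) < -1)]
  cases k with
  | zero => simp
  | succ k' =>
    rw [if_pos (by push_cast; omega)]
    rw [show ((((k'+1:Nat):Int) - 1) - (-1) + -(-1) - 1) / -(-1) = ((k'+1 : Nat) : Int) by push_cast; omega]
    rw [Int.toNat_natCast]
    exact List.map_congr_left (fun a _ => by push_cast; ring)

lemma pyRange_desc_cons (k : Nat) :
    PySem.List.pyRange (((k : Nat) + 1 : Int) - 1) (-1) (-1) = (k : Int) :: PySem.List.pyRange ((k : Int) - 1) (-1) (-1) := by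
  have h1 := pyRange_desc_eq (k+1)
  push_cast at h1 ⊢
  rw [h1, pyRange_desc_eq k, List.range_succ_eq_map, List.map_cons, List.map_map]
  refine congrArg₂ _ (by push_cast; ring)
    (List.map_congr_left (fun a _ => by simp [Function.comp]; ring))

lemma dict_insert_items_of_not_contains {ν : Type} (d : PySem.Dict Int ν) (q : Int) (v : ν)
    (h : d.contains q = false) : (d.insert q v).items = d.items ++ [(q, v)] := by
  simp [PySem.Dict.insert, h]

lemma dict_insert_keys_of_not_contains {ν : Type} (d : PySem.Dict Int ν) (q : Int) (v : ν)
    (h : d.contains q = false) : (d.insert q v).keys = d.keys ++ [q] := by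
  simp [PySem.Dict.insert, PySem.Dict.keys, h]

lemma A_char (l : List Int) (m : Int) :
  ∀ (k : Nat) (d : PySem.Dict Int (List Int)) (seen : List Int),
    (∀ x, x ∈ seen ↔ x ∈ d.keys) →
    ((PySem.List.pyRange ((k:Int) - 1) (-1) (-1)).foldl
      (fun (d : PySem.Dict Int (List Int)) i =>
        if !(d.contains (PySem.Int.mod (PySem.List.pyGetD l i 0) m)) then
          d.insert (PySem.Int.mod (PySem.List.pyGetD l i 0) m) (PySem.List.slice l none (some (i + 1)))
        else d) d).items
    = d.items ++ (spec2 l m k seen).map (toEntry l) := by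
  intro k
  induction k with
  | zero =>
    intro d seen h
    simp [spec2]
  | succ k ih =>
    intro d seen h
    have hc := pyRange_desc_cons k
    push_cast at hc ⊢
    rw [hc, List.foldl_cons]
    simp only [PySem.List.pyGetD_natCast]
    set q := PySem.Int.mod (l.getD k 0) m with hq
    by_cases hb : d.contains q = true
    · rw [if_neg (by simp [hb])]
      rw [ih d seen h]
      have : q ∈ seen := (h q).mpr ((PySem.Dict.contains_iff_mem_keys d q).mp hb)
      simp only [spec2]
      rw [if_pos this]
    · rw [if_pos (by simp [Bool.not_eq_true] at hb ⊢; exact hb)]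
      have hb' : d.contains q = false := by simpa using hb
      have hqs : ¬ q ∈ seen := fun hs => hb ((PySem.Dict.contains_iff_mem_keys d q).mpr ((h q).mp hs))
      rw [ih (d.insert q (PySem.List.slice l none (some ((k:Int) + 1)))) (q :: seen)
        (by intro x
            rw [dict_insert_keys_of_not_contains d q _ hb']
            simp [h x, or_comm])]
      rw [dict_insert_items_of_not_contains d q _ hb']
      simp only [spec2]
      rw [if_neg hqs]
      simp only [List.map_cons, toEntry, List.append_assoc, List.cons_append, List.nil_append]
      rw [← hq]

lemma take_succ_concat (l : List Int) (k : Nat) (hk : k < l.length) :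
    l.take (k + 1) = l.take k ++ [l.getD k 0] := by
  rw [List.take_add_one, List.getD, List.getElem?_eq_getElem hk]
  simp

lemma emit_char (l : List Int) (m : Int) :
    ∀ (k : Nat), k ≤ l.length → ∀ (s : PySem.Set Int) (seen : List Int),
      (∀ x, x ∈ s ↔ x ∈ seen) →
      pvEmit (l.take k) s m = (spec2 l m k seen).map (toEntry l) := by
  intro k
  induction k with
  | zero =>
    intro _ s seen _
    rw [pvEmit]
    simp [spec2]
  | succ k ih =>
    intro hk s seen hmem
    have hklt : k < l.length := by omega
    have hconc := take_succ_concat l k hklt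
    have hne : l.take (k + 1) ≠ [] := by rw [hconc]; simp
    rw [pvEmit, dif_neg hne]
    have hlast : (l.take (k + 1)).getLast hne = l.getD k 0 := by
      simp [hconc]
    have hdrop : (l.take (k + 1)).dropLast = l.take k := by
      rw [hconc, List.dropLast_concat]
    simp only [hlast, hdrop]
    set q := PySem.Int.mod (l.getD k 0) m with hq
    simp only [spec2, ← hq]
    by_cases hqs : q ∈ seen
    · rw [if_pos (by rw [PySem.Set.contains_iff]; exact (hmem q).mpr hqs), if_pos hqs]
      exact ih (by omega) s seen hmem
    · rw [if_neg (by simp [hmem q]; exact hqs), if_neg hqs]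
      rw [List.map_cons]
      refine congrArg₂ _ ?_ ?_
      · simp only [toEntry]
        rw [show ((k : Int) + 1) = ((k + 1 : Nat) : Int) by push_cast; ring,
          PySem.List.slice_to_natCast]
      · exact ih (by omega) (PySem.Set.add s q) (q :: seen)
          (by intro x
              rw [PySem.Set.mem_add]
              simp [hmem x, or_comm])

theorem genCondTransactions_core (l : List Int) (m : Int) :
    ((PySem.List.pyRange ((l.length : Int) - 1) (-1) (-1)).foldl
      (fun (d : PySem.Dict Int (List Int)) i =>
        let item := PySem.List.pyGetD l i 0
        let partition := getPartitionId item m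
        if !(d.contains partition) then
          d.insert partition (PySem.List.slice l none (some (i + 1)))
        else d) PySem.Dict.empty).items
    = pvEmit l PySem.Set.empty m := by
  simp only [getPartitionId]
  have hA := A_char l m l.length PySem.Dict.empty []
    (by intro x; simp [PySem.Dict.empty, PySem.Dict.keys])
  rw [hA, show (PySem.Dict.empty : PySem.Dict Int (List Int)).items = [] from rfl, List.nil_append]
  have hB := emit_char l m l.length le_rfl PySem.Set.empty []
    (by intro x; simp [PySem.Set.empty])
  rw [List.take_length] at hB
  rw [hB]

-- ===== VERDICT (by name: the statement is the Claim_ definition above) =====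
theorem genCondTransactions_spec : Claim_equal_genCondTransactions := by
  intro basket rank nPartitions _ _
  unfold Spec_genCondTransactions genCondTransactions genCondTransactions_alt
  exact genCondTransactions_core _ nPartitions
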